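-- pv_equiv track=rewrite | github.com/pypi-data/pypi-mirror-22 | packages/dartqc/dartqc-0.1.4.tar.gz/dartqc-0.1.4/dartqc/DartModules.py | _get_snp_sum
-- ===== SOURCE A (Python) =====
-- def _get_snp_sum(dicts):
--
--     s = 0
--     for d in dicts:
--         for k, v in d.items():
--             if k in ("maf", "hwe", "rep_average", "monomorphic", "call_rate", "clusters", "duplicates"):
--                 if v is not None:
--                     s += int(v)
--
--     return s
-- ===== SOURCE B (Python) =====
-- KEYS = ("maf", "hwe", "rep_average", "monomorphic", "call_rate", "clusters", "duplicates")
--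
--
-- def _get_snp_sum(dicts):
--     # Key-major order: for each target key, total its values across all dicts.
--     return sum(
--         sum(int(v) for d in dicts if (v := d.get(key)) is not None)
--         for key in KEYS
--     )
-- ===== Notes on version B (the rewrite author's own statement) =====
-- stated objective: alternative
-- what changed: B swaps the loop nesting: the outer loop runs over the fixed 7-key tuple and the inner pass totals that key's value across all dicts via direct lookup, replacing A's item-by-item scan of every dict's items filtered by tuple membership; the results agree because dict keys are unique, so each (dict, key) pair contributes exactly once in either traversal order.
import Mathlib
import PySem

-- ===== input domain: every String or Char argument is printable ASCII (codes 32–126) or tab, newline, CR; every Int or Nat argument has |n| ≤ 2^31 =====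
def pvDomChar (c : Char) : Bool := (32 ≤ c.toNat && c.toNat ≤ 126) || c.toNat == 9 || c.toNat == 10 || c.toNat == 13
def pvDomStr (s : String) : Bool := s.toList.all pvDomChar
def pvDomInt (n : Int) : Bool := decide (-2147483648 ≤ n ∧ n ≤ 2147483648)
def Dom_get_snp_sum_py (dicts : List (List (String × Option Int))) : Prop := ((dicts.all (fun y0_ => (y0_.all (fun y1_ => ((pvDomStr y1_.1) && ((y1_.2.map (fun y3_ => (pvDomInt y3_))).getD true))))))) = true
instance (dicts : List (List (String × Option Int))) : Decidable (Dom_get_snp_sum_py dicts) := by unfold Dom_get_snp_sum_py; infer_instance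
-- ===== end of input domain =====

-- B swaps the loop nesting: outer loop over the fixed 7-key tuple, inner pass totalling that
-- key across all dicts by direct lookup, instead of A's scan of every item filtered by membership
-- (alternative traversal order; same result since dict keys are unique).

-- ===== PORT A =====
-- s = 0; for d in dicts: for k, v in d.items(): if k in (7 keys): if v is not None: s += int(v)
def get_snp_sum_py (dicts : List (List (String × Option Int))) : Int :=
  dicts.foldl (fun s d =>
    d.foldl (fun s kv =>
      if (["maf", "hwe", "rep_average", "monomorphic", "call_rate", "clusters", "duplicates"] : List String).contains kv.1 then
        match kv.2 with
        | some v => s + v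
        | none => s
      else s) s) 0

-- ===== PORT B =====
-- KEYS, the module-level tuple of target keys
def pvKEYS : List String := ["maf", "hwe", "rep_average", "monomorphic", "call_rate", "clusters", "duplicates"]

-- sum( sum(int(v) for d in dicts if (v := d.get(key)) is not None) for key in KEYS )
def get_snp_sum_py_alt (dicts : List (List (String × Option Int))) : Int :=
  (pvKEYS.map (fun key =>
    (dicts.filterMap (fun d =>
      match (PySem.Dict.mk d).get? key with
      | some (some v) => some v
      | _ => none)).sum)).sum

-- ===== PRECONDITION & SPEC =====
-- Pre_ requires each inner association list to have pairwise-distinct keys: a Python dict cannot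
-- hold duplicate keys, so duplicate-key lists do not represent any input the Python function sees.
def Pre_get_snp_sum_py (dicts : List (List (String × Option Int))) : Prop :=
  ∀ d ∈ dicts, (d.map Prod.fst).Nodup
instance (dicts : List (List (String × Option Int))) : Decidable (Pre_get_snp_sum_py dicts) := by unfold Pre_get_snp_sum_py; infer_instance
def pvWitness_get_snp_sum_py : (List (List (String × Option Int))) :=
  [[("maf", some 2), ("other", none)], [("hwe", none), ("clusters", some (-3))]]
def Spec_get_snp_sum_py (dicts : List (List (String × Option Int))) (out : Int) : Prop := out = get_snp_sum_py_alt dicts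
instance (dicts : List (List (String × Option Int))) (out : Int) : Decidable (Spec_get_snp_sum_py dicts out) := by unfold Spec_get_snp_sum_py; infer_instance

-- ===== CLAIM (what is proved, stated in full; the proofs are below) =====
def Claim_equal_get_snp_sum_py : Prop := ∀ (dicts : List (List (String × Option Int))), Dom_get_snp_sum_py dicts → Pre_get_snp_sum_py dicts → Spec_get_snp_sum_py dicts (get_snp_sum_py dicts)

-- ===== LEMMAS AND PROOFS =====

-- value of an A-side item
def pvF (K : List String) (kv : String × Option Int) : Int :=
  if K.contains kv.1 then kv.2.getD 0 else 0

-- value of a B-side lookup result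
def pvG : Option (Option Int) → Int
  | some (some v) => v
  | _ => 0

lemma pvG_shift (v : Option Int) (L' : List (String × Option Int)) (k : String)
    (hk : (PySem.Dict.mk L').get? k = none) :
    ∀ (K : List String), K.Nodup →
    (K.map (fun key => pvG (if (k == key) then some v else (PySem.Dict.mk L').get? key))).sum
      = (if K.contains k then v.getD 0 else 0) + (K.map (fun key => pvG ((PySem.Dict.mk L').get? key))).sum := by
  intro K hK
  induction K with
  | nil => simp
  | cons key K' ih =>
    rcases List.nodup_cons.mp hK with ⟨hnk, hK'⟩
    by_cases hkk : k = key
    · subst hkk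
      have hcongr : (K'.map (fun key => pvG (if (k == key) then some v else (PySem.Dict.mk L').get? key)))
          = (K'.map (fun key => pvG ((PySem.Dict.mk L').get? key))) := by
        apply List.map_congr_left
        intro x hx
        have : ¬ (k == x) = true := by
          simp only [beq_iff_eq]
          intro h; exact hnk (h ▸ hx)
        simp [this]
      simp only [List.map_cons, List.sum_cons, beq_self_eq_true, if_true, hcongr,
        List.contains_cons, beq_self_eq_true, Bool.true_or, if_true, hk]
      cases v <;> simp [pvG]
    · have hne : ¬ (k == key) = true := by simp [beq_iff_eq, hkk]
      simp only [List.map_cons, List.sum_cons, hne, Bool.false_eq_true, if_false, ih hK',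
        List.contains_cons]
      simp only [Bool.false_or]
      split <;> ring

-- per-dict bridge: sum of A's filtered items = sum of B's lookups over the key list
lemma pv_core (K : List String) (hK : K.Nodup) :
    ∀ (L : List (String × Option Int)), (L.map Prod.fst).Nodup →
    (L.map (pvF K)).sum = (K.map (fun key => pvG ((PySem.Dict.mk L).get? key))).sum := by
  intro L
  induction L with
  | nil =>
    intro _
    simp [PySem.Dict.get?, pvG]
  | cons kv L' ih =>
    intro hL
    obtain ⟨k, v⟩ := kv
    rw [List.map_cons] at hL
    rcases List.nodup_cons.mp hL with ⟨hnk, hL'⟩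
    have hget : (PySem.Dict.mk L').get? k = none := by
      rw [PySem.Dict.get?_eq_none_iff_not_mem_keys]
      simpa [PySem.Dict.keys] using hnk
    have hshift := pvG_shift v L' k hget K hK
    have hrw : (K.map (fun key => pvG ((PySem.Dict.mk ((k, v) :: L')).get? key)))
        = (K.map (fun key => pvG (if (k == key) then some v else (PySem.Dict.mk L').get? key))) := by
      apply List.map_congr_left
      intro x _
      rw [PySem.Dict.get?_mk_cons]
    rw [hrw, hshift, ← ih hL']
    simp [pvF]

-- pointwise sum splits over a list
lemma pv_sum_map_add {β : Type} (g h : β → Int) (l : List β) :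
    (l.map g).sum + (l.map h).sum = (l.map (fun b => g b + h b)).sum := by
  induction l with
  | nil => simp
  | cons b l ih =>
    simp only [List.map_cons, List.sum_cons, ← ih]
    ring

-- exchanging the two summations (key-major vs dict-major)
lemma pv_sum_swap {α β : Type} (f : α → β → Int) (xs : List α) (ys : List β) :
    (xs.map (fun a => (ys.map (f a)).sum)).sum
      = (ys.map (fun b => (xs.map (fun a => f a b)).sum)).sum := by
  induction xs with
  | nil => simp
  | cons a xs ih =>
    simp only [List.map_cons, List.sum_cons, ih]
    rw [pv_sum_map_add (f a) (fun b => (xs.map (fun a => f a b)).sum) ys]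

-- B's per-key filterMap-sum equals the map-sum over pvG
lemma pv_filterMap (key : String) (dicts : List (List (String × Option Int))) :
    (dicts.filterMap (fun d =>
      match (PySem.Dict.mk d).get? key with
      | some (some v) => some v
      | _ => none)).sum
      = (dicts.map (fun d => pvG ((PySem.Dict.mk d).get? key))).sum := by
  induction dicts with
  | nil => rfl
  | cons d ds ih =>
    simp only [List.filterMap_cons, List.map_cons, List.sum_cons]
    cases h : (PySem.Dict.mk d).get? key with
    | none => simpa [pvG, h] using ih
    | some o =>
      cases o with
      | none => simpa [pvG, h] using ih
      | some v => simp [pvG, List.sum_cons, ih]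

-- A's nested foldl as a dict-major sum of sums
lemma pv_A_sum (dicts : List (List (String × Option Int))) :
    get_snp_sum_py dicts
      = (dicts.map (fun d => (d.map (pvF pvKEYS)).sum)).sum := by
  unfold get_snp_sum_py
  have hinner : ∀ (d : List (String × Option Int)) (s : Int),
      d.foldl (fun s kv =>
        if (["maf", "hwe", "rep_average", "monomorphic", "call_rate", "clusters", "duplicates"] : List String).contains kv.1 then
          match kv.2 with
          | some v => s + v
          | none => s
        else s) s = s + (d.map (pvF pvKEYS)).sum := by
    intro d s
    have h : d.foldl (fun s kv =>
        if (["maf", "hwe", "rep_average", "monomorphic", "call_rate", "clusters", "duplicates"] : List String).contains kv.1 then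
          match kv.2 with
          | some v => s + v
          | none => s
        else s) s = d.foldl (fun s kv => s + pvF pvKEYS kv) s := by
      apply PySem.List.foldl_congr_mem
      intro acc kv _
      unfold pvF pvKEYS
      split
      · cases hv : kv.2 <;> simp
      · simp
    rw [h, PySem.List.foldl_add]
  have h2 : dicts.foldl (fun s d =>
      d.foldl (fun s kv =>
        if (["maf", "hwe", "rep_average", "monomorphic", "call_rate", "clusters", "duplicates"] : List String).contains kv.1 then
          match kv.2 with
          | some v => s + v
          | none => s
        else s) s) 0
      = dicts.foldl (fun s d => s + (d.map (pvF pvKEYS)).sum) 0 := by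
    apply PySem.List.foldl_congr_mem
    intro acc d _
    exact hinner d acc
  rw [h2, PySem.List.foldl_add]
  simp

-- ===== VERDICT (by name: the statement is the Claim_ definition above) =====
theorem get_snp_sum_py_spec : Claim_equal_get_snp_sum_py := by
  intro dicts _ hpre
  unfold Spec_get_snp_sum_py get_snp_sum_py_alt
  rw [pv_A_sum]
  have hB : (pvKEYS.map (fun key =>
      (dicts.filterMap (fun d =>
        match (PySem.Dict.mk d).get? key with
        | some (some v) => some v
        | _ => none)).sum)).sum
      = (pvKEYS.map (fun key => (dicts.map (fun d => pvG ((PySem.Dict.mk d).get? key))).sum)).sum := by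
    apply congrArg
    apply List.map_congr_left
    intro key _
    exact pv_filterMap key dicts
  rw [hB, pv_sum_swap (fun key d => pvG ((PySem.Dict.mk d).get? key)) pvKEYS dicts]
  apply congrArg
  apply List.map_congr_left
  intro d hd
  exact pv_core pvKEYS (by decide) d (hpre d hd)
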